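-- pv_equiv track=rewrite | github.com/Nimaj2002/Linear-Code-Tools | functions.py | arrays_with_lowest_sum
-- ===== SOURCE A (Python) =====
-- def arrays_with_lowest_sum(array_of_arrays):
--     if not array_of_arrays:
--         return []
--
--     # Calculate the sum of each sub-array
--     sums = [sum(arr) for arr in array_of_arrays]
--
--     # Find the minimum sum
--     min_sum = min(sums)
--
--     # Collect all sub-arrays that have the minimum sum
--     result = [list(arr)
--               for arr, s in zip(array_of_arrays, sums) if s == min_sum]
--
--     return result
-- ===== SOURCE B (Python) =====
-- def arrays_with_lowest_sum(array_of_arrays):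
--     min_sum = None
--     result = []
--     for arr in array_of_arrays:
--         s = sum(arr)
--         if min_sum is None or s < min_sum:
--             min_sum = s
--             result = [list(arr)]
--         elif s == min_sum:
--             result.append(list(arr))
--     return result
-- ===== Notes on version B (the rewrite author's own statement) =====
-- stated objective: alternative
-- what changed: Replaced the three-pass pipeline (sums list, min, filter over zip) by a single fold maintaining the current minimum sum and the running list of best sub-arrays.
import Mathlib
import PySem

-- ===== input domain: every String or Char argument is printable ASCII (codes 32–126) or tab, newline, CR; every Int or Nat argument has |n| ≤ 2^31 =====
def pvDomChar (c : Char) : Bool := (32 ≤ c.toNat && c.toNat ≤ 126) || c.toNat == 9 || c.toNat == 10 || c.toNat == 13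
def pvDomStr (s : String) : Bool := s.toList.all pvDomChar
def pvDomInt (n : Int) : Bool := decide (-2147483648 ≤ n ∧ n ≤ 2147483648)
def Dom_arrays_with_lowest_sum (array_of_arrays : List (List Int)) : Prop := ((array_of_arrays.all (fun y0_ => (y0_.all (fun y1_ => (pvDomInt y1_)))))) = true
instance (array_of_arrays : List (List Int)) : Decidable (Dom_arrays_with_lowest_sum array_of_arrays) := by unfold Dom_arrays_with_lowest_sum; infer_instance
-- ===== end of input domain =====

-- B replaces A's three passes (sums list, min, filter over zip) by one fold keeping the
-- current minimum sum and the running result list in a single pass (objective: alternative).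

-- ===== PORT A =====
def arrays_with_lowest_sum (array_of_arrays : List (List Int)) : List (List Int) :=
  if array_of_arrays = [] then []
  else
    -- sums = [sum(arr) for arr in array_of_arrays]
    let sums := array_of_arrays.map List.sum
    -- min_sum = min(sums)
    match PySem.List.min? sums (fun x => x) with
    | none => []   -- unreachable: sums nonempty here
    | some minSum =>
      -- [list(arr) for arr, s in zip(array_of_arrays, sums) if s == min_sum]
      ((array_of_arrays.zip sums).filter (fun p => p.2 == minSum)).map Prod.fst

-- ===== PORT B =====
-- one loop iteration of Source B: state = (min_sum, result)
def pvAltStep (st : Option Int × List (List Int)) (arr : List Int) : Option Int × List (List Int) :=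
  let s := arr.sum
  match st.1 with
  | none => (some s, [arr])
  | some m =>
    if s < m then (some s, [arr])
    else if s = m then (some m, st.2 ++ [arr])
    else st

def arrays_with_lowest_sum_alt (array_of_arrays : List (List Int)) : List (List Int) :=
  (array_of_arrays.foldl pvAltStep (none, [])).2

-- ===== PRECONDITION & SPEC =====
def Spec_arrays_with_lowest_sum (array_of_arrays : List (List Int)) (out : List (List Int)) : Prop := out = arrays_with_lowest_sum_alt array_of_arrays
instance (array_of_arrays : List (List Int)) (out : List (List Int)) : Decidable (Spec_arrays_with_lowest_sum array_of_arrays out) := by unfold Spec_arrays_with_lowest_sum; infer_instance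

-- ===== CLAIM (what is proved, stated in full; the proofs are below) =====
def Claim_equal_arrays_with_lowest_sum : Prop := ∀ (array_of_arrays : List (List Int)), Dom_arrays_with_lowest_sum array_of_arrays → Spec_arrays_with_lowest_sum array_of_arrays (arrays_with_lowest_sum array_of_arrays)

-- ===== LEMMAS AND PROOFS =====

-- A's zip-with-sums comprehension is a plain filter on the sub-arrays.
lemma zip_sums_filter (xs : List (List Int)) (m : Int) :
    ((xs.zip (xs.map List.sum)).filter (fun p => p.2 == m)).map Prod.fst
      = xs.filter (fun arr => arr.sum == m) := by
  induction xs with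
  | nil => rfl
  | cons h t ih =>
    simp only [List.map_cons, List.zip_cons_cons, List.filter_cons]
    by_cases hm : h.sum == m <;> simp [hm, ih]

-- Invariant of B's fold: it carries the minimum of the sums seen so far together
-- with the filter of the prefix by that minimum.
lemma fold_invariant (xs : List (List Int)) :
    xs.foldl pvAltStep (none, []) =
      match PySem.List.min? (xs.map List.sum) (fun x => x) with
      | none => (none, [])
      | some m => (some m, xs.filter (fun arr => arr.sum == m)) := by
  induction xs using List.reverseRecOn with
  | nil => rfl
  | append_singleton xs a ih =>
    rw [List.foldl_append, ih]
    rcases hxs : xs with _ | ⟨h, t⟩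
    · simp [PySem.List.min?, pvAltStep]
    · have hmin : PySem.List.min? ((h :: t).map List.sum) (fun x => x)
          = some ((t.map List.sum).foldl min h.sum) := by
        simp [PySem.List.min?_id_cons]
      have hmin' : PySem.List.min? (((h :: t) ++ [a]).map List.sum) (fun x => x)
          = some (min ((t.map List.sum).foldl min h.sum) a.sum) := by
        simp [PySem.List.min?_id_cons, List.foldl_append]
      set m := (t.map List.sum).foldl min h.sum with hm
      have hle : ∀ y ∈ (h :: t).map List.sum, m ≤ y := by
        intro y hy
        exact PySem.List.min?_isMin hmin y hy
      rw [hmin, hmin']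
      simp only [List.foldl_cons, List.foldl_nil, List.filter_append]
      by_cases h1 : a.sum < m
      · have : min m a.sum = a.sum := by omega
        rw [this]
        have hnil : (h :: t).filter (fun arr => arr.sum == a.sum) = [] := by
          rw [List.filter_eq_nil_iff]
          intro arr harr hb
          have := hle arr.sum (List.mem_map_of_mem harr)
          simp only [beq_iff_eq] at hb
          omega
        simp [pvAltStep, h1, hnil]
      · have hmm : min m a.sum = m := by omega
        rw [hmm]
        by_cases h2 : a.sum = m
        · simp [pvAltStep, h2]
        · have : (List.filter (fun arr => arr.sum == m) [a]) = [] := by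
            simp [h2]
          simp [pvAltStep, h1, h2, this]

-- ===== VERDICT (by name: the statement is the Claim_ definition above) =====
theorem arrays_with_lowest_sum_spec : Claim_equal_arrays_with_lowest_sum := by
  intro xs _
  unfold Spec_arrays_with_lowest_sum arrays_with_lowest_sum arrays_with_lowest_sum_alt
  rw [fold_invariant]
  rcases xs with _ | ⟨h, t⟩
  · rfl
  · simp only [if_neg (List.cons_ne_nil h t), List.map_cons, PySem.List.min?_id_cons]
    simpa using zip_sums_filter (h :: t) (List.foldl min h.sum (t.map List.sum))
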